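-- pv_equiv track=rewrite | github.com/jamesdeluk/data-projects | wbw_translator/app.py | create_partial_table
-- ===== SOURCE A (Python) =====
-- def calculate_table_structure(words):
--     """Pre-calculate the complete table structure accounting for punctuation cells"""
--     if not words:
--         return []
--
--     words_per_row = 10
--     rows = []
--     current_row = []
--     current_row_cells = 0
--
--     for word in words:
--         if word.strip():
--             current_row.append(('word', word))
--             current_row_cells += 1
--
--             # Add extra empty cell after sentence-ending punctuation
--             if word.strip() and word.rstrip().endswith(('.', '?', '!')):
--                 current_row.append(('punctuation_space', ''))
--                 current_row_cells += 1
--         else: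
--             current_row.append(('empty', ''))
--             current_row_cells += 1
--
--         # If we've reached the row limit, start a new row
--         if current_row_cells >= words_per_row:
--             rows.append(current_row)
--             current_row = []
--             current_row_cells = 0
--
--     # Add the last row if it has content
--     if current_row:
--         rows.append(current_row)
--
--     return rows
--
-- def create_partial_table(words, translations):
--     """Create partial HTML table for live building during translation"""
--     if not words:
--         return ""
--
--     table_structure = calculate_table_structure(words)
--
--     # Create partial table with 0 padding/margin
--     html = '<table style="border-collapse: collapse; width: 100%; margin: 0; padding: 0;">'
--
--     for row in table_structure:
--         # Translation row
--         html += '<tr>'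
--         for cell_type, word in row:
--             if cell_type == 'word':
--                 # Find the translation for this word
--                 translation = ""
--                 if word in [w for w in words if w == word]:
--                     word_index = words.index(word)
--                     if word_index < len(translations):
--                         translation = translations[word_index]
--
--                 style = "background-color: #fff3e0; color: #333;"
--
--                 html += f'<td style="padding: 0; margin: 0; text-align: center; {style} min-width: 80px; white-space: nowrap;">'
--                 html += f'<div style="font-size: 12px; margin: 0; padding: 2px 4px;">{translation}</div>'
--                 html += '</td>'
--             else:  # punctuation_space or empty
--                 html += '<td style="padding: 0; margin: 0; min-width: 80px;"></td>'
--         html += '</tr>'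
--
--         # Original text row
--         html += '<tr>'
--         for cell_type, word in row:
--             if cell_type == 'word':
--                 html += f'<td style="padding: 0; margin: 0; text-align: center; font-weight: bold; font-size: 16px; border-top: 1px solid #ddd; white-space: nowrap;">{word}</td>'
--             else:  # punctuation_space or empty
--                 html += '<td style="padding: 0; margin: 0; border-top: 1px solid #ddd;"></td>'
--         html += '</tr>'
--
--         html += '<tr><td colspan="100" style="padding: 0; margin: 0; background-color: #f9f9f9; height: 10px;"></td></tr>'
--
--     html += '</table>'
--     return html
-- ===== SOURCE B (Python) =====
-- def create_partial_table(words, translations):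
--     """Create partial HTML table in one pass, with a first-occurrence translation map."""
--     if not words:
--         return ""
--
--     trans = {}
--     for i, w in enumerate(words):
--         if w not in trans:
--             trans[w] = translations[i] if i < len(translations) else ""
--
--     spacer = '<tr><td colspan="100" style="padding: 0; margin: 0; background-color: #f9f9f9; height: 10px;"></td></tr>'
--     empty_trans = '<td style="padding: 0; margin: 0; min-width: 80px;"></td>'
--     empty_word = '<td style="padding: 0; margin: 0; border-top: 1px solid #ddd;"></td>'
--
--     html = '<table style="border-collapse: collapse; width: 100%; margin: 0; padding: 0;">'
--     trow = ""
--     wrow = ""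
--     cells = 0
--     for word in words:
--         if word.strip():
--             trow += ('<td style="padding: 0; margin: 0; text-align: center; '
--                      'background-color: #fff3e0; color: #333; min-width: 80px; white-space: nowrap;">'
--                      f'<div style="font-size: 12px; margin: 0; padding: 2px 4px;">{trans[word]}</div></td>')
--             wrow += ('<td style="padding: 0; margin: 0; text-align: center; font-weight: bold; '
--                      f'font-size: 16px; border-top: 1px solid #ddd; white-space: nowrap;">{word}</td>')
--             cells += 1
--             if word.rstrip().endswith(('.', '?', '!')):
--                 trow += empty_trans
--                 wrow += empty_word
--                 cells += 1
--         else: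
--             trow += empty_trans
--             wrow += empty_word
--             cells += 1
--         if cells >= 10:
--             html += '<tr>' + trow + '</tr>' + '<tr>' + wrow + '</tr>' + spacer
--             trow = ""
--             wrow = ""
--             cells = 0
--     if cells:
--         html += '<tr>' + trow + '</tr>' + '<tr>' + wrow + '</tr>' + spacer
--     return html + '</table>'
-- ===== Notes on version B (the rewrite author's own statement) =====
-- stated objective: faster
-- what changed: B fuses A's structure-building helper and two-pass-per-row rendering into a single pass over words that accumulates the two row strings directly, and replaces A's per-word list-comprehension membership test plus words.index scan with a first-occurrence translation dict built once.
import Mathlib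
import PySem

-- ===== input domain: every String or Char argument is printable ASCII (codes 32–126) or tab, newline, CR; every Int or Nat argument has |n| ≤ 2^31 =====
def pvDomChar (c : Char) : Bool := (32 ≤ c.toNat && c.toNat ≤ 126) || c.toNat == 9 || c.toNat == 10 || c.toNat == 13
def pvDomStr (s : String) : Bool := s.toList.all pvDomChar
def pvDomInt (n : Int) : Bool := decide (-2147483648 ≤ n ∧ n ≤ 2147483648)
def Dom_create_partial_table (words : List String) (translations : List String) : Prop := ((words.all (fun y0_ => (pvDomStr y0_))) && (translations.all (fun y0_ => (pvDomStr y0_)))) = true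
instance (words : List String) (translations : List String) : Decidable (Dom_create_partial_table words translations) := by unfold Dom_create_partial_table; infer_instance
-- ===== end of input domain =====

-- B builds the HTML in one fused pass over `words` (two row accumulators flushed every 10
-- cells) and replaces A's per-word `words.index` scan by a first-occurrence translation map.

-- shared HTML literals (pure string constants of the output format, used by both ports)
def pvTablePrefix : String := "<table style=\"border-collapse: collapse; width: 100%; margin: 0; padding: 0;\">"
def pvSpacerRow : String := "<tr><td colspan=\"100\" style=\"padding: 0; margin: 0; background-color: #f9f9f9; height: 10px;\"></td></tr>"
def pvTransCellHTML (t : String) : String :=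
  "<td style=\"padding: 0; margin: 0; text-align: center; background-color: #fff3e0; color: #333; min-width: 80px; white-space: nowrap;\">"
  ++ ("<div style=\"font-size: 12px; margin: 0; padding: 2px 4px;\">" ++ t ++ "</div>")
  ++ "</td>"
def pvEmptyTransCell : String := "<td style=\"padding: 0; margin: 0; min-width: 80px;\"></td>"
def pvWordCellHTML (w : String) : String :=
  "<td style=\"padding: 0; margin: 0; text-align: center; font-weight: bold; font-size: 16px; border-top: 1px solid #ddd; white-space: nowrap;\">" ++ w ++ "</td>"
def pvEmptyWordCell : String := "<td style=\"padding: 0; margin: 0; border-top: 1px solid #ddd;\"></td>"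

-- ===== PORT A =====
-- word.rstrip().endswith(('.', '?', '!'))  (tuple endswith = any of the three)
def pvEndsPunct (word : String) : Bool :=
  PySem.Str.endswith (PySem.Str.rstrip word) "." || PySem.Str.endswith (PySem.Str.rstrip word) "?"
    || PySem.Str.endswith (PySem.Str.rstrip word) "!"

-- loop body of calculate_table_structure; state = (rows, current_row, current_row_cells)
def pvA_step (st : List (List (String × String)) × List (String × String) × Nat) (word : String) :
    List (List (String × String)) × List (String × String) × Nat :=
  match st with
  | (rows, cur, cells) =>
    let (cur, cells) :=
      if PySem.Str.strip word ≠ "" then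
        let cur := cur ++ [("word", word)]
        let cells := cells + 1
        -- `if word.strip() and word.rstrip().endswith(...)`
        if PySem.Str.strip word ≠ "" ∧ pvEndsPunct word = true then
          (cur ++ [("punctuation_space", "")], cells + 1)
        else (cur, cells)
      else (cur ++ [("empty", "")], cells + 1)
    if cells ≥ 10 then (rows ++ [cur], ([] : List (String × String)), 0) else (rows, cur, cells)

def calculate_table_structure (words : List String) : List (List (String × String)) :=
  if words = [] then []
  else
    let st := words.foldl pvA_step ([], [], 0)
    if st.2.1 ≠ [] then st.1 ++ [st.2.1] else st.1

-- the translation lookup inside A's rendering loop, transliterated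
def pvA_translationOf (words translations : List String) (word : String) : String :=
  if word ∈ words.filter (fun w => w == word) then
    match PySem.List.index? words word with
    | some i => if i < translations.length then translations.getD i "" else ""
    | none => ""   -- unreachable: the membership test above guarantees word ∈ words
  else ""

def pvA_transCell (words translations : List String) (cell : String × String) : String :=
  if cell.1 = "word" then pvTransCellHTML (pvA_translationOf words translations cell.2)
  else pvEmptyTransCell

def pvA_wordCell (cell : String × String) : String :=
  if cell.1 = "word" then pvWordCellHTML cell.2 else pvEmptyWordCell

def create_partial_table (words : List String) (translations : List String) : String :=
  if words = [] then ""
  else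
    let tableStructure := calculate_table_structure words
    let html := pvTablePrefix
    let html := tableStructure.foldl (fun html row =>
      let html := html ++ "<tr>"
      let html := row.foldl (fun h c => h ++ pvA_transCell words translations c) html
      let html := html ++ "</tr>"
      let html := html ++ "<tr>"
      let html := row.foldl (fun h c => h ++ pvA_wordCell c) html
      let html := html ++ "</tr>"
      html ++ pvSpacerRow) html
    html ++ "</table>"

-- ===== PORT B =====
-- first-occurrence translation map: for i, w in enumerate(words): if w not in trans: trans[w] = …
def pvB_dict (words translations : List String) : PySem.Dict String String :=
  (PySem.List.enumerate words).foldl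
    (fun d iw =>
      if d.contains iw.2 then d
      else d.insert iw.2 (if iw.1 < (translations.length : Int) then PySem.List.pyGetD translations iw.1 "" else ""))
    PySem.Dict.empty

-- loop body of B; state = (html, trow, wrow, cells)
def pvB_step (d : PySem.Dict String String) (st : String × String × String × Nat) (word : String) :
    String × String × String × Nat :=
  match st with
  | (html, trow, wrow, cells) =>
    let (trow, wrow, cells) :=
      if PySem.Str.strip word ≠ "" then
        let trow := trow ++ pvTransCellHTML (d.getD word "")   -- trans[word]: key always present
        let wrow := wrow ++ pvWordCellHTML word
        let cells := cells + 1
        if pvEndsPunct word = true then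
          (trow ++ pvEmptyTransCell, wrow ++ pvEmptyWordCell, cells + 1)
        else (trow, wrow, cells)
      else (trow ++ pvEmptyTransCell, wrow ++ pvEmptyWordCell, cells + 1)
    if cells ≥ 10 then
      (html ++ "<tr>" ++ trow ++ "</tr>" ++ "<tr>" ++ wrow ++ "</tr>" ++ pvSpacerRow, "", "", 0)
    else (html, trow, wrow, cells)

def create_partial_table_alt (words : List String) (translations : List String) : String :=
  if words = [] then ""
  else
    let d := pvB_dict words translations
    match words.foldl (pvB_step d) (pvTablePrefix, "", "", 0) with
    | (html, trow, wrow, cells) =>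
      (if cells ≠ 0 then html ++ "<tr>" ++ trow ++ "</tr>" ++ "<tr>" ++ wrow ++ "</tr>" ++ pvSpacerRow
       else html) ++ "</table>"

-- ===== PRECONDITION & SPEC =====
def Spec_create_partial_table (words : List String) (translations : List String) (out : String) : Prop := out = create_partial_table_alt words translations
instance (words : List String) (translations : List String) (out : String) : Decidable (Spec_create_partial_table words translations out) := by unfold Spec_create_partial_table; infer_instance

-- ===== CLAIM (what is proved, stated in full; the proofs are below) =====
def Claim_equal_create_partial_table : Prop := ∀ (words : List String) (translations : List String), Dom_create_partial_table words translations → Spec_create_partial_table words translations (create_partial_table words translations)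

-- ===== LEMMAS AND PROOFS =====

-- proof-side abbreviations: A's two inner rendering folds and its per-row HTML
def pvT (words translations : List String) (cur : List (String × String)) : String :=
  cur.foldl (fun h c => h ++ pvA_transCell words translations c) ""
def pvW (cur : List (String × String)) : String :=
  cur.foldl (fun h c => h ++ pvA_wordCell c) ""
def pvRowHTML (words translations : List String) (row : List (String × String)) : String :=
  "<tr>" ++ pvT words translations row ++ "</tr><tr>" ++ pvW row ++ "</tr>" ++ pvSpacerRow
def pvBfinish (st : String × String × String × Nat) : String :=
  if st.2.2.2 ≠ 0 then st.1 ++ "<tr>" ++ st.2.1 ++ "</tr>" ++ "<tr>" ++ st.2.2.1 ++ "</tr>" ++ pvSpacerRow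
  else st.1

-- a foldl that appends strings factors through its start
lemma pvFoldl_str_factor {α : Type} (g : α → String) (xs : List α) (s : String) :
    xs.foldl (fun h c => h ++ g c) s = s ++ xs.foldl (fun h c => h ++ g c) "" := by
  induction xs generalizing s with
  | nil => simp [List.foldl]
  | cons x xs ih =>
    simp only [List.foldl]
    rw [ih (s ++ g x), ih ("" ++ g x), String.empty_append, String.append_assoc]

-- A's outer rendering fold, one row at a time
lemma pvRender_row (words translations : List String) (h : String) (row : List (String × String)) :
    List.foldl (fun h c => h ++ pvA_wordCell c)
        (List.foldl (fun h c => h ++ pvA_transCell words translations c) (h ++ "<tr>") row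
          ++ "</tr>" ++ "<tr>") row ++ "</tr>" ++ pvSpacerRow
      = h ++ pvRowHTML words translations row := by
  simp only [pvRowHTML, pvT, pvW]
  rw [pvFoldl_str_factor (pvA_transCell words translations) row (h ++ "<tr>"),
      pvFoldl_str_factor pvA_wordCell row]
  simp [String.append_assoc]

-- one A-step's rows output is its input rows plus a step-determined suffix
lemma pvA_step_factor (R : List (List (String × String))) (cur : List (String × String))
    (cells : Nat) (w : String) :
    pvA_step (R, cur, cells) w
      = (R ++ (pvA_step ([], cur, cells) w).1, (pvA_step ([], cur, cells) w).2) := by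
  simp only [pvA_step]
  split_ifs <;> simp

-- the rows component of A's structure fold only ever grows on the right
lemma pvA_rows_factor (ws : List String) (R : List (List (String × String)))
    (cur : List (String × String)) (cells : Nat) :
    ws.foldl pvA_step (R, cur, cells)
      = (R ++ (ws.foldl pvA_step ([], cur, cells)).1, (ws.foldl pvA_step ([], cur, cells)).2) := by
  induction ws generalizing R cur cells with
  | nil => simp
  | cons w ws ih =>
    simp only [List.foldl]
    rcases hs : pvA_step ([], cur, cells) w with ⟨d, c', n'⟩
    rw [pvA_step_factor, hs]
    rw [ih (R ++ d) c' n', ih d c' n']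
    simp

-- the dict fold over an enumerated suffix, from any start index and any accumulated dict
lemma pvDict_aux (translations : List String) (ws : List String) :
    ∀ (s : Int) (d0 : PySem.Dict String String) (w : String),
    ((PySem.List.enumerate ws s).foldl
        (fun d iw =>
          if d.contains iw.2 then d
          else d.insert iw.2 (if iw.1 < (translations.length : Int) then PySem.List.pyGetD translations iw.1 "" else ""))
        d0).getD w ""
      = if d0.contains w = true then d0.getD w ""
        else match PySem.List.index? ws w with
             | some i => if (s + (i : Int)) < (translations.length : Int)
                         then PySem.List.pyGetD translations (s + (i : Int)) "" else ""
             | none => "" := by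
  induction ws with
  | nil =>
    intro s d0 w
    simp only [PySem.List.enumerate_nil, List.foldl_nil]
    cases hc : d0.contains w with
    | true => simp
    | false =>
      rw [PySem.Dict.getD_of_not_contains _ _ hc,
        (PySem.List.index?_eq_none_iff ([] : List String) w).mpr List.not_mem_nil]
      simp
  | cons x ws ih =>
    intro s d0 w
    rw [PySem.List.enumerate_cons, List.foldl_cons]
    cases hx : d0.contains x with
    | true =>
      simp only [if_true]
      rw [ih (s + 1) d0 w]
      cases hc : d0.contains w with
      | true => simp
      | false =>
        simp only [Bool.false_eq_true, if_false]
        by_cases hwx : x = w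
        · subst hwx; rw [hx] at hc; exact absurd hc (by simp)
        · rw [PySem.List.index?_cons_of_ne ws hwx]
          cases h : PySem.List.index? ws w with
          | none => simp
          | some i =>
            simp only [Option.map_some]
            have hcast : s + 1 + (i : Int) = s + ((i + 1 : Nat) : Int) := by push_cast; ring
            rw [← hcast]
    | false =>
      simp only [Bool.false_eq_true, if_false]
      rw [ih (s + 1) _ w]
      by_cases hwx : x = w
      · subst hwx
        rw [PySem.Dict.contains_insert_self]
        simp only [if_true]
        rw [PySem.Dict.getD_insert_self, hx, PySem.List.index?_cons_self]
        simp
      · rw [PySem.Dict.contains_insert]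
        have hbx : (w == x) = false := by simp; exact fun h => hwx h.symm
        simp only [hbx, Bool.false_or]
        rw [PySem.Dict.getD_insert_of_ne _ _ _ (fun h => hwx h.symm),
          PySem.List.index?_cons_of_ne ws hwx]
        cases hc : d0.contains w with
        | true => simp
        | false =>
          simp only [Bool.false_eq_true, if_false]
          cases h : PySem.List.index? ws w with
          | none => simp
          | some i =>
            simp only [Option.map_some]
            have hcast : s + 1 + (i : Int) = s + ((i + 1 : Nat) : Int) := by push_cast; ring
            rw [← hcast]

-- the first-occurrence dict computes A's `words.index`-based translation, for every word
lemma pvDict_eq (words translations : List String) (w : String) :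
    (pvB_dict words translations).getD w "" = pvA_translationOf words translations w := by
  rw [pvB_dict, pvDict_aux translations words 0 PySem.Dict.empty w]
  simp only [PySem.Dict.contains_empty, Bool.false_eq_true, if_false, pvA_translationOf]
  by_cases hm : w ∈ words
  · have hmem : w ∈ words.filter (fun x => x == w) := by simp [List.mem_filter, hm]
    rw [if_pos hmem]
    cases hi : PySem.List.index? words w with
    | none => rfl
    | some i =>
      simp only [zero_add]
      by_cases hlt : i < translations.length
      · rw [if_pos (by exact_mod_cast hlt), if_pos hlt]
        simp
      · rw [if_neg (by exact_mod_cast hlt), if_neg hlt]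
  · have hmem : w ∉ words.filter (fun x => x == w) := by simp [List.mem_filter, hm]
    rw [if_neg hmem, (PySem.List.index?_eq_none_iff words w).mpr hm]

-- appending one cell to a row appends its HTML to both row renders
lemma pvT_snoc (a b : List String) (cur : List (String × String)) (c : String × String) :
    pvT a b (cur ++ [c]) = pvT a b cur ++ pvA_transCell a b c := by
  simp [pvT]

lemma pvW_snoc (cur : List (String × String)) (c : String × String) :
    pvW (cur ++ [c]) = pvW cur ++ pvA_wordCell c := by
  simp [pvW]

lemma pvT_snoc2 (a b : List String) (cur : List (String × String)) (c1 c2 : String × String) :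
    pvT a b (cur ++ [c1, c2]) = pvT a b cur ++ pvA_transCell a b c1 ++ pvA_transCell a b c2 := by
  rw [show cur ++ [c1, c2] = (cur ++ [c1]) ++ [c2] by simp, pvT_snoc, pvT_snoc]

lemma pvW_snoc2 (cur : List (String × String)) (c1 c2 : String × String) :
    pvW (cur ++ [c1, c2]) = pvW cur ++ pvA_wordCell c1 ++ pvA_wordCell c2 := by
  rw [show cur ++ [c1, c2] = (cur ++ [c1]) ++ [c2] by simp, pvW_snoc, pvW_snoc]

-- evaluating A's cell renderers on the three cell tags
lemma pvCell_tword (a b : List String) (w : String) :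
    pvA_transCell a b ("word", w) = pvTransCellHTML (pvA_translationOf a b w) := by
  simp [pvA_transCell]

lemma pvCell_tpunct (a b : List String) :
    pvA_transCell a b ("punctuation_space", "") = pvEmptyTransCell := by
  simp [pvA_transCell]

lemma pvCell_tempty (a b : List String) :
    pvA_transCell a b ("empty", "") = pvEmptyTransCell := by
  simp [pvA_transCell]

lemma pvCell_wword (w : String) : pvA_wordCell ("word", w) = pvWordCellHTML w := by
  simp [pvA_wordCell]

lemma pvCell_wpunct : pvA_wordCell ("punctuation_space", "") = pvEmptyWordCell := by
  simp [pvA_wordCell]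

lemma pvCell_wempty : pvA_wordCell ("empty", "") = pvEmptyWordCell := by
  simp [pvA_wordCell]

-- merging the adjacent row tags ("</tr>" then "<tr>") into one literal
lemma pvTrTr (X : String) : "</tr>" ++ ("<tr>" ++ X) = "</tr><tr>" ++ X := by
  rw [← String.append_assoc]; rfl

-- A's cell counter is the length of the current row
lemma pvA_cells (cur : List (String × String)) (w : String) :
    (pvA_step ([], cur, cur.length) w).2.2 = (pvA_step ([], cur, cur.length) w).2.1.length := by
  simp only [pvA_step]
  split_ifs <;> simp

-- one B-step equals A's step under the row-render correspondence
lemma pvStep_comm (words translations : List String) (cur : List (String × String))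
    (html : String) (w : String) :
    pvB_step (pvB_dict words translations) (html, pvT words translations cur, pvW cur, cur.length) w
      = ((pvA_step ([], cur, cur.length) w).1.foldl
            (fun h row => h ++ pvRowHTML words translations row) html,
         pvT words translations (pvA_step ([], cur, cur.length) w).2.1,
         pvW (pvA_step ([], cur, cur.length) w).2.1,
         (pvA_step ([], cur, cur.length) w).2.1.length) := by
  simp only [pvB_step, pvA_step, pvDict_eq]
  by_cases hstrip : PySem.Str.strip w = ""
  · simp only [hstrip, ne_eq, not_true_eq_false, if_false, false_and]
    by_cases hten : cur.length + 1 ≥ 10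
    · simp [hten, pvRowHTML, pvCell_tempty, pvCell_wempty, pvT, pvW, String.append_assoc]
    · simp [hten, pvT_snoc, pvW_snoc, pvCell_tempty, pvCell_wempty]
  · simp only [hstrip, ne_eq, not_false_eq_true, if_true, true_and]
    by_cases hp : pvEndsPunct w = true
    · simp only [hp, if_true]
      by_cases hten : cur.length + 1 + 1 ≥ 10
      · simp [hten, pvRowHTML, pvCell_tword, pvCell_wword, pvCell_tpunct, pvCell_wpunct,
          pvT, pvW, String.append_assoc]
      · simp [hten, pvT_snoc2, pvW_snoc2, pvCell_tword, pvCell_wword, pvCell_tpunct,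
          pvCell_wpunct, String.append_assoc]
    · simp only [hp]
      by_cases hten : cur.length + 1 ≥ 10
      · simp [hten, pvRowHTML, pvCell_tword, pvCell_wword, pvT, pvW, String.append_assoc]
      · simp [hten, pvT_snoc, pvW_snoc, pvCell_tword, pvCell_wword]

-- main invariant: B's fused fold computes A's render of A's structure fold
set_option maxHeartbeats 1000000 in
lemma pvMain (words translations : List String) (ws : List String) :
    ∀ (cur : List (String × String)) (html : String),
    pvBfinish (ws.foldl (pvB_step (pvB_dict words translations))
        (html, pvT words translations cur, pvW cur, cur.length))
      = (ws.foldl pvA_step ([], cur, cur.length)).1.foldl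
          (fun h row => h ++ pvRowHTML words translations row) html
        ++ (if (ws.foldl pvA_step ([], cur, cur.length)).2.1 ≠ []
            then pvRowHTML words translations (ws.foldl pvA_step ([], cur, cur.length)).2.1 else "") := by
  induction ws with
  | nil =>
    intro cur html
    simp only [List.foldl_nil, pvBfinish]
    by_cases hcur : cur = []
    · subst hcur; simp
    · rw [if_pos (by simpa using hcur), if_pos hcur]
      simp only [pvRowHTML, String.append_assoc, pvTrTr]
  | cons w ws ih =>
    intro cur html
    simp only [List.foldl_cons]
    rw [pvStep_comm]
    have hcl := pvA_cells cur w
    rcases hA : pvA_step ([], cur, cur.length) w with ⟨R, c', n'⟩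
    rw [hA] at hcl
    simp only at hcl ⊢
    rw [hcl]
    simp only [pvA_rows_factor ws R c' c'.length, List.foldl_append]
    exact ih c' (R.foldl (fun h row => h ++ pvRowHTML words translations row) html)

-- ===== VERDICT (by name: the statement is the Claim_ definition above) =====
theorem create_partial_table_spec : Claim_equal_create_partial_table := by
  intro words translations _
  unfold Spec_create_partial_table
  rw [create_partial_table, create_partial_table_alt]
  by_cases hw : words = []
  · simp [hw]
  · rw [if_neg hw, if_neg hw]
    dsimp only
    rw [calculate_table_structure, if_neg hw]
    dsimp only
    have hmain := pvMain words translations words [] pvTablePrefix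
    simp only [pvT, pvW, List.foldl_nil, List.length_nil] at hmain
    rcases hst : words.foldl (pvB_step (pvB_dict words translations)) (pvTablePrefix, "", "", 0)
      with ⟨h1, h2, h3, h4⟩
    rw [hst] at hmain
    have hrow : ∀ (R : List (List (String × String))) (h0 : String),
        R.foldl (fun html row =>
            List.foldl (fun h c => h ++ pvA_wordCell c)
              (List.foldl (fun h c => h ++ pvA_transCell words translations c)
                (html ++ "<tr>") row ++ "</tr>" ++ "<tr>") row ++ "</tr>" ++ pvSpacerRow) h0
          = R.foldl (fun h row => h ++ pvRowHTML words translations row) h0 := by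
      intro R h0
      refine List.foldl_ext _ _ h0 ?_
      intro x r _
      exact pvRender_row words translations x r
    by_cases hne : (words.foldl pvA_step ([], [], 0)).2.1 = []
    · rw [if_neg (not_not_intro hne)]
      rw [if_neg (not_not_intro hne), String.append_empty] at hmain
      rw [hrow, ← hmain]
      rfl
    · rw [if_pos hne]
      rw [if_pos hne] at hmain
      rw [List.foldl_append, List.foldl_cons, List.foldl_nil, hrow, pvRender_row, ← hmain]
      rfl
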